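-- pv_equiv track=rewrite | github.com/joshanashakya/dissertation | workspace/dataset/java-python/GeeksForGeeks/1958/A/2.py | answerQuery
-- ===== SOURCE A (Python) =====
-- def answerQuery(a, n, l, r):
--
--     # answer for query
--     count = 0
--
--     # 0 based index
--     l = l - 1
--
--     # iterate for all elements
--     for i in range(l, r, 1):
--         element = a[i]
--         divisors = 0
--
--         # check if the element divides
--         # all numbers in range
--         for j in range(l, r, 1):
--
--             # no of elements
--             if (a[j] % a[i] == 0):
--                 divisors += 1
--             else:
--                 break
--
--         # if all elements are divisible
--         # by a[i]
--         if (divisors == (r - l)):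
--             count += 1
--
--     # answer for every query
--     return count
-- ===== SOURCE B (Python) =====
-- def _gcd(g, x):
--     x = -x if x < 0 else x
--     while x:
--         g, x = x, g % x
--     return g
--
--
-- def answerQuery(a, n, l, r):
--     # gcd of the queried elements once, then count elements whose absolute value equals it
--     seg = [a[i] for i in range(l - 1, r)]
--     g = 0
--     for x in seg:
--         g = _gcd(g, x)
--     count = 0
--     for x in seg:
--         if (-x if x < 0 else x) == g:
--             count += 1
--     return count
-- ===== Notes on version B (the rewrite author's own statement) =====
-- stated objective: alternative
-- what changed: Replaces the nested all-pairs divisibility scan by computing the gcd of the queried elements once and counting the elements whose absolute value equals it.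
import Mathlib
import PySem

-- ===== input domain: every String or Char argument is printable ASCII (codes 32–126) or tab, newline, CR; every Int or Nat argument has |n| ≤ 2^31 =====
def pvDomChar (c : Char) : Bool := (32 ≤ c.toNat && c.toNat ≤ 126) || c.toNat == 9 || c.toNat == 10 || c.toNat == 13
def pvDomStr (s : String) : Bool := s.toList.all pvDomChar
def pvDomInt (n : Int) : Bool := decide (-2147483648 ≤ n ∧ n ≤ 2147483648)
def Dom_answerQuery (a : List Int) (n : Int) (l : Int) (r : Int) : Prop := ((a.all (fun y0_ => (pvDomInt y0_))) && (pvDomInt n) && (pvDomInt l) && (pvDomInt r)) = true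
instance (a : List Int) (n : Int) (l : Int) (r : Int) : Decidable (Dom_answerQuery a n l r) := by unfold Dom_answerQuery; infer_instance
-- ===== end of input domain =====

-- B computes the gcd of the queried elements once and counts the elements whose absolute value
-- equals it, a different algorithm than A's nested divisibility scan (objective: alternative).


-- ===== PORT A =====
-- inner 'for j' loop of A: counts divisible elements, breaking at the first non-divisible one
def answerQueryInner (a : List Int) (ai : Int) : List Int → Int → Int
  | [], divisors => divisors
  | j :: js, divisors =>
      if PySem.Int.mod (PySem.List.pyGetD a j 0) ai = 0 then
        answerQueryInner a ai js (divisors + 1)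
      else divisors

def answerQuery (a : List Int) (n : Int) (l : Int) (r : Int) : Int :=
  let l := l - 1
  (PySem.List.pyRange l r 1).foldl
    (fun count i =>
      let element := PySem.List.pyGetD a i 0
      let divisors := answerQueryInner a element (PySem.List.pyRange l r 1) 0
      if divisors = r - l then count + 1 else count)
    0

-- ===== PORT B =====
-- Source B's hand-written Euclid loop (its g stays nonnegative throughout, so it runs on Nat)
def pyGcdLoop (g x : Nat) : Nat :=
  if h : x = 0 then g else pyGcdLoop x (g % x)
termination_by x
decreasing_by exact Nat.mod_lt _ (Nat.pos_of_ne_zero h)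

def answerQuery_alt (a : List Int) (n : Int) (l : Int) (r : Int) : Int :=
  let seg := (PySem.List.pyRange (l - 1) r 1).map (fun i => PySem.List.pyGetD a i 0)
  let g : Nat := seg.foldl (fun g x => pyGcdLoop g x.natAbs) 0
  seg.foldl (fun count x => if x.natAbs = g then count + 1 else count) 0

-- ===== PRECONDITION & SPEC =====
-- Pre_ is exactly the inputs on which A returns: it excludes only the inputs where A raises —
-- an index of range(l-1, r) outside [-len(a), len(a)) (IndexError) or a zero among the queried
-- elements (ZeroDivisionError).
def Pre_answerQuery (a : List Int) (n : Int) (l : Int) (r : Int) : Prop :=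
  r ≤ l - 1 ∨ (-(a.length : Int) ≤ l - 1 ∧ r ≤ (a.length : Int) ∧
    ∀ j ∈ PySem.List.pyRange (l - 1) r 1, PySem.List.pyGetD a j 0 ≠ (0 : Int))
instance (a : List Int) (n : Int) (l : Int) (r : Int) : Decidable (Pre_answerQuery a n l r) := by
  unfold Pre_answerQuery; infer_instance

def pvWitness_answerQuery : List Int × Int × Int × Int := ([2, 4, 6], 3, 1, 3)

def Spec_answerQuery (a : List Int) (n : Int) (l : Int) (r : Int) (out : Int) : Prop := out = answerQuery_alt a n l r
instance (a : List Int) (n : Int) (l : Int) (r : Int) (out : Int) : Decidable (Spec_answerQuery a n l r out) := by unfold Spec_answerQuery; infer_instance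

-- ===== CLAIM (what is proved, stated in full; the proofs are below) =====
def Claim_equal_answerQuery : Prop := ∀ (a : List Int) (n : Int) (l : Int) (r : Int), Dom_answerQuery a n l r → Pre_answerQuery a n l r → Spec_answerQuery a n l r (answerQuery a n l r)

-- ===== LEMMAS AND PROOFS =====

-- A's inner loop reaches the full count exactly when every queried element is divisible by ai
theorem answerQueryInner_eq_iff (a : List Int) (ai : Int) (js : List Int) (d : Int) :
    answerQueryInner a ai js d = d + js.length ↔
      ∀ j ∈ js, PySem.Int.mod (PySem.List.pyGetD a j 0) ai = 0 := by
  induction js generalizing d with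
  | nil => simp [answerQueryInner]
  | cons j js ih =>
    simp only [answerQueryInner, List.length_cons, List.mem_cons]
    split
    · rename_i h
      push_cast
      rw [show d + ((js.length : Int) + 1) = (d + 1) + js.length by ring, ih]
      constructor
      · intro hall k hk; rcases hk with rfl | hk; · exact h
        exact hall k hk
      · intro hall k hk; exact hall k (Or.inr hk)
    · rename_i h
      constructor
      · intro he; exfalso; omega
      · intro hall; exact absurd (hall j (Or.inl rfl)) h

-- Source B's Euclid loop is the gcd
theorem pyGcdLoop_eq (g x : Nat) : pyGcdLoop g x = Nat.gcd x g := by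
  induction x using Nat.strong_induction_on generalizing g with
  | _ x ih =>
    rw [pyGcdLoop]
    split
    · rename_i h; subst h; simp
    · rename_i h
      rw [ih (g % x) (Nat.mod_lt _ (Nat.pos_of_ne_zero h)), Nat.gcd_rec x g]

-- divisor characterisation of the gcd fold
theorem dvd_foldG (seg : List Int) (g0 d : Nat) :
    d ∣ seg.foldl (fun g x => Nat.gcd x.natAbs g) g0 ↔ d ∣ g0 ∧ ∀ y ∈ seg, d ∣ y.natAbs := by
  induction seg generalizing g0 with
  | nil => simp
  | cons x xs ih =>
    simp only [List.foldl_cons, ih, Nat.dvd_gcd_iff, List.mem_cons]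
    constructor
    · rintro ⟨⟨h1, h2⟩, h3⟩
      refine ⟨h2, fun y hy => ?_⟩
      rcases hy with rfl | hy
      · exact h1
      · exact h3 y hy
    · rintro ⟨h1, h2⟩
      exact ⟨⟨h2 x (Or.inl rfl), h1⟩, fun y hy => h2 y (Or.inr hy)⟩

-- an element of the query divides every queried element iff its |·| is their gcd
theorem natAbs_eq_gcd_iff (seg : List Int) (x : Int) (hx : x ∈ seg) :
    x.natAbs = seg.foldl (fun g x => Nat.gcd x.natAbs g) 0 ↔ ∀ y ∈ seg, x ∣ y := by
  have hG : ∀ y ∈ seg, (seg.foldl (fun g x => Nat.gcd x.natAbs g) 0) ∣ y.natAbs :=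
    ((dvd_foldG seg 0 _).mp dvd_rfl).2
  constructor
  · intro he y hy
    exact Int.natAbs_dvd_natAbs.mp (he ▸ hG y hy)
  · intro h
    refine Nat.dvd_antisymm ?_ (hG x hx)
    exact (dvd_foldG seg 0 x.natAbs).mpr
      ⟨dvd_zero _, fun y hy => Int.natAbs_dvd_natAbs.mpr (h y hy)⟩

-- the two ports agree on every input (Pre_ is only about the Python A raising)
theorem answerQuery_eq_alt (a : List Int) (n l r : Int) :
    answerQuery a n l r = answerQuery_alt a n l r := by
  simp only [answerQuery, answerQuery_alt]
  rw [PySem.List.foldl_ite_add_one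
    (p := fun i => answerQueryInner a (PySem.List.pyGetD a i 0)
      (PySem.List.pyRange (l - 1) r 1) 0 = r - (l - 1)),
    PySem.List.foldl_ite_add_one
    (p := fun x : Int => x.natAbs =
      ((PySem.List.pyRange (l - 1) r 1).map (fun i => PySem.List.pyGetD a i 0)).foldl
        (fun g x => pyGcdLoop g x.natAbs) 0)]
  have hgfold : ∀ seg : List Int,
      seg.foldl (fun g x => pyGcdLoop g x.natAbs) 0
        = seg.foldl (fun g x => Nat.gcd x.natAbs g) 0 := by
    intro seg
    apply PySem.List.foldl_congr_mem
    intro acc x _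
    exact pyGcdLoop_eq acc x.natAbs
  rw [hgfold]
  congr 1
  congr 1
  rw [List.countP_map]
  apply List.countP_congr
  intro i hi
  simp only [Function.comp_apply, decide_eq_true_eq]
  have hi' : PySem.List.pyGetD a i 0
      ∈ (PySem.List.pyRange (l - 1) r 1).map (fun j => PySem.List.pyGetD a j 0) :=
    List.mem_map_of_mem hi
  have hmem := (PySem.List.mem_pyRange_one).mp hi
  have hlen : ((PySem.List.pyRange (l - 1) r 1).length : Int) = r - (l - 1) := by
    rw [PySem.List.pyRange_one]; simp only [List.length_map, List.length_range]; omega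
  rw [show r - (l - 1) = (0 : Int) + (PySem.List.pyRange (l - 1) r 1).length from by omega,
    answerQueryInner_eq_iff, natAbs_eq_gcd_iff _ _ hi']
  simp only [PySem.Int.mod_eq_zero_iff_dvd]
  simp only [List.mem_map, PySem.List.mem_pyRange_one, forall_exists_index, and_imp]
  constructor
  · intro h y j h1 h2 he; subst he; exact h j h1 h2
  · intro h j h1 h2; exact h _ j h1 h2 rfl

-- ===== VERDICT (by name: the statement is the Claim_ definition above) =====
theorem answerQuery_spec : Claim_equal_answerQuery := by
  intro a n l r _ _
  unfold Spec_answerQuery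
  exact answerQuery_eq_alt a n l r
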